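-- pv_equiv track=rewrite | github.com/tals21/STEP-gpt | backend/app/ingest.py | build_chapter_map
-- ===== SOURCE A (Python) =====
-- def build_chapter_map(toc, total_pages):
--     chapter_map = {}
--     current_chapter = "Unknown Chapter"
--     toc_entries = sorted([(entry[2], entry[1]) for entry in toc])
--     if not toc_entries:
--         return {p: current_chapter for p in range(1, total_pages + 1)}
--     entry_idx = 0
--     for p in range(1, total_pages + 1):
--         while entry_idx < len(toc_entries) and p >= toc_entries[entry_idx][0]:
--             current_chapter = toc_entries[entry_idx][1]
--             entry_idx += 1
--         chapter_map[p] = current_chapter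
--     return chapter_map
-- ===== SOURCE B (Python) =====
-- def build_chapter_map(toc, total_pages):
--     chapter_map = {p: "Unknown Chapter" for p in range(1, total_pages + 1)}
--     entries = sorted((e[2], e[1]) for e in toc)
--     for i, (pg, title) in enumerate(entries):
--         end = entries[i + 1][0] if i + 1 < len(entries) else total_pages + 1
--         for p in range(max(pg, 1), min(end, total_pages + 1)):
--             chapter_map[p] = title
--     return chapter_map
-- ===== Notes on version B (the rewrite author's own statement) =====
-- stated objective: alternative
-- what changed: Instead of scanning pages 1..total_pages while advancing a TOC pointer, B pre-fills every page with 'Unknown Chapter' and then writes each sorted TOC entry's title over its contiguous page range [entry.page, next entry.page).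
import Mathlib
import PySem

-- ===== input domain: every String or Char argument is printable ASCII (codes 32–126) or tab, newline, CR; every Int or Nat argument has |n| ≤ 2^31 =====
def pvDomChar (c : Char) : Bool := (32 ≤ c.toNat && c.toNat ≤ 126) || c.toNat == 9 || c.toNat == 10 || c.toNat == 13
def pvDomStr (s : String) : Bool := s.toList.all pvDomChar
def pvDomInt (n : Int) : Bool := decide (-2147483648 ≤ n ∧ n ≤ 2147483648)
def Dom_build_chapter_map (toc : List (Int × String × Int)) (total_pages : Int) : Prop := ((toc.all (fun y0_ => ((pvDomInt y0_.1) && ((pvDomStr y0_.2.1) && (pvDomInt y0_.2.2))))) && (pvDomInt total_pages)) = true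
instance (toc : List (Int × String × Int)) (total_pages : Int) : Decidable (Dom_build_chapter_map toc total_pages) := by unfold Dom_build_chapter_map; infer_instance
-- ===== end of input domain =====

-- B fills the chapter map per TOC entry (contiguous page ranges over a pre-filled map)
-- instead of A's per-page scan with an advancing TOC pointer; same cost, different decomposition.

-- ===== PORT A =====
-- the inner 'while entry_idx < len(...) and p >= toc_entries[entry_idx][0]' loop,
-- with the advancing index represented by the remaining suffix of toc_entries
def advanceA : List (Int × String) → String → Int → List (Int × String) × String
  | [], cur, _ => ([], cur)
  | (pg, t) :: rest, cur, p => if pg ≤ p then advanceA rest t p else ((pg, t) :: rest, cur)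

def build_chapter_map (toc : List (Int × String × Int)) (total_pages : Int) : List (Int × String) :=
  let toc_entries := PySem.List.sorted2 (toc.map (fun e => (e.2.2, e.2.1))) Prod.fst Prod.snd
  if toc_entries = [] then
    -- {p: current_chapter for p in range(1, total_pages + 1)}
    ((PySem.List.pyRange 1 (total_pages + 1) 1).foldl
      (fun (d : PySem.Dict Int String) p => d.insert p "Unknown Chapter") PySem.Dict.empty).items
  else
    (((PySem.List.pyRange 1 (total_pages + 1) 1).foldl
      (fun (st : PySem.Dict Int String × List (Int × String) × String) p =>
        let a := advanceA st.2.1 st.2.2 p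
        (st.1.insert p a.2, a.1, a.2))
      (PySem.Dict.empty, toc_entries, "Unknown Chapter")).1).items

-- ===== PORT B =====
-- the entry loop of Source B: each entry writes its title over [max(pg,1), min(end, total+1));
-- the lookahead 'entries[i+1][0] if i+1 < len(entries) else total_pages+1' is the head of the suffix
def fillB (total : Int) : List (Int × String) → PySem.Dict Int String → PySem.Dict Int String
  | [], d => d
  | (pg, t) :: rest, d =>
    let e : Int := match rest with | [] => total + 1 | (pg2, _) :: _ => pg2
    fillB total rest
      ((PySem.List.pyRange (max pg 1) (min e (total + 1)) 1).foldl (fun d p => d.insert p t) d)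

def build_chapter_map_alt (toc : List (Int × String × Int)) (total_pages : Int) : List (Int × String) :=
  let d0 := (PySem.List.pyRange 1 (total_pages + 1) 1).foldl
    (fun (d : PySem.Dict Int String) p => d.insert p "Unknown Chapter") PySem.Dict.empty
  let entries := PySem.List.sorted2 (toc.map (fun e => (e.2.2, e.2.1))) Prod.fst Prod.snd
  (fillB total_pages entries d0).items

-- ===== PRECONDITION & SPEC =====
def Spec_build_chapter_map (toc : List (Int × String × Int)) (total_pages : Int) (out : List (Int × String)) : Prop := out = build_chapter_map_alt toc total_pages
instance (toc : List (Int × String × Int)) (total_pages : Int) (out : List (Int × String)) : Decidable (Spec_build_chapter_map toc total_pages out) := by unfold Spec_build_chapter_map; infer_instance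

-- ===== CLAIM (what is proved, stated in full; the proofs are below) =====
def Claim_equal_build_chapter_map : Prop := ∀ (toc : List (Int × String × Int)) (total_pages : Int), Dom_build_chapter_map toc total_pages → Spec_build_chapter_map toc total_pages (build_chapter_map toc total_pages)

-- ===== LEMMAS AND PROOFS =====

-- the chapter of page p: title of the last entry (in list order) whose page is ≤ p, starting from cur
def chapF (cur : String) (l : List (Int × String)) (p : Int) : String :=
  l.foldl (fun acc e => if e.1 ≤ p then e.2 else acc) cur

-- pages are nondecreasing in the sorted TOC
lemma insertBy_pairwise {α : Type} (R : α → α → Prop) (before : α → α → Bool)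
    (htrans : ∀ a b c, R a b → R b c → R a c)
    (ht : ∀ a b, before a b = true → R a b) (hf : ∀ a b, before a b = false → R b a)
    (x : α) : ∀ l : List α, l.Pairwise R → (PySem.List.insertBy before x l).Pairwise R := by
  intro l
  induction l with
  | nil => intro _; simp [PySem.List.insertBy]
  | cons y ys ih =>
    intro hp
    rw [List.pairwise_cons] at hp
    simp only [PySem.List.insertBy]
    by_cases h : before x y = true
    · rw [if_pos h]
      refine List.Pairwise.cons ?_ (List.Pairwise.cons hp.1 hp.2)
      intro z hz
      rcases List.mem_cons.1 hz with rfl | hz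
      · exact ht _ _ h
      · exact htrans _ _ _ (ht _ _ h) (hp.1 z hz)
    · rw [if_neg h]
      refine List.Pairwise.cons ?_ (ih hp.2)
      intro z hz
      have hmem := (PySem.List.mem_insertBy before x z ys).1 hz
      rcases hmem with rfl | hmem
      · exact hf _ _ (by simpa using h)
      · exact hp.1 z hmem

lemma sorted2_pairwise_fst (xs : List (Int × String)) :
    (PySem.List.sorted2 xs Prod.fst Prod.snd false).Pairwise (fun a b => a.1 ≤ b.1) := by
  simp only [PySem.List.sorted2]
  suffices h : ∀ (l : List (Int × String)) (acc : List (Int × String)),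
      acc.Pairwise (fun a b => a.1 ≤ b.1) →
      (l.foldl (fun acc x => PySem.List.insertBy
        (fun a b => decide (a.1 < b.1) || !decide (b.1 < a.1) && decide (a.2 < b.2)) x acc) acc).Pairwise
        (fun a b => a.1 ≤ b.1) by
    exact h xs [] (by simp)
  intro l
  induction l with
  | nil => intro acc h; simpa using h
  | cons x t ih =>
    intro acc h
    simp only [List.foldl_cons]
    apply ih
    apply insertBy_pairwise _ _ ?_ ?_ ?_ _ _ h
    · intro a b c hab hbc; exact le_trans hab hbc
    · intro a b hb
      simp only [Bool.or_eq_true, Bool.and_eq_true, decide_eq_true_eq, Bool.not_eq_true',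
        decide_eq_false_iff_not] at hb
      rcases hb with h1 | ⟨h1, _⟩
      · exact le_of_lt h1
      · exact le_of_not_gt h1
    · intro a b hb
      simp only [Bool.or_eq_false_iff, Bool.and_eq_false_iff, decide_eq_false_iff_not] at hb
      exact le_of_not_gt hb.1

-- ---- A-side characterisation ----

lemma advanceA_eq (p : Int) : ∀ (l : List (Int × String)) (cur : String),
    advanceA l cur p =
      (l.dropWhile (fun e => decide (e.1 ≤ p)), chapF cur (l.takeWhile (fun e => decide (e.1 ≤ p))) p) := by
  intro l
  induction l with
  | nil => intro cur; simp [advanceA, chapF]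
  | cons e rest ih =>
    intro cur
    obtain ⟨pg, t⟩ := e
    by_cases h : pg ≤ p
    · simp [advanceA, h, chapF, ih]
    · simp [advanceA, h, chapF]

lemma dropWhile_fst_gt (p : Int) (l : List (Int × String))
    (hs : l.Pairwise (fun a b => a.1 ≤ b.1)) :
    ∀ e ∈ l.dropWhile (fun e => decide (e.1 ≤ p)), p < e.1 := by
  induction l with
  | nil => simp
  | cons x t ih =>
    rw [List.pairwise_cons] at hs
    by_cases h : x.1 ≤ p
    · rw [List.dropWhile_cons_of_pos (by simpa using h)]
      exact ih hs.2
    · rw [List.dropWhile_cons_of_neg (by simpa using h)]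
      intro e he
      rcases List.mem_cons.1 he with rfl | he
      · omega
      · have := hs.1 e he; omega

lemma chapF_append (cur : String) (l1 l2 : List (Int × String)) (p : Int) :
    chapF cur (l1 ++ l2) p = chapF (chapF cur l1 p) l2 p := by
  simp [chapF, List.foldl_append]

lemma chapF_of_all_gt (cur : String) (l : List (Int × String)) (p : Int)
    (h : ∀ e ∈ l, p < e.1) : chapF cur l p = cur := by
  induction l generalizing cur with
  | nil => rfl
  | cons x t ih =>
    have hx : ¬ x.1 ≤ p := by have := h x (by simp); omega
    simp only [chapF, List.foldl_cons, if_neg hx]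
    exact ih _ (fun e he => h e (List.mem_cons_of_mem _ he))

lemma chapF_takeWhile (cur : String) (l : List (Int × String)) (p : Int)
    (hs : l.Pairwise (fun a b => a.1 ≤ b.1)) :
    chapF cur (l.takeWhile (fun e => decide (e.1 ≤ p))) p = chapF cur l p := by
  conv_rhs => rw [← List.takeWhile_append_dropWhile (p := fun e => decide (e.1 ≤ p)) (l := l)]
  rw [chapF_append, chapF_of_all_gt _ _ _ (dropWhile_fst_gt p l hs)]

lemma chapF_takeWhile_shift (cur : String) (l : List (Int × String)) (a q : Int) (haq : a ≤ q) :
    chapF cur (l.takeWhile (fun e => decide (e.1 ≤ a))) q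
      = chapF cur (l.takeWhile (fun e => decide (e.1 ≤ a))) a := by
  apply PySem.List.foldl_congr_mem
  intro acc e he
  have := List.mem_takeWhile_imp he
  simp only [decide_eq_true_eq] at this
  rw [if_pos this, if_pos (by omega)]

lemma chapF_drop_shift (cur : String) (l : List (Int × String)) (a q : Int) (haq : a ≤ q) :
    chapF (chapF cur (l.takeWhile (fun e => decide (e.1 ≤ a))) a)
      (l.dropWhile (fun e => decide (e.1 ≤ a))) q = chapF cur l q := by
  conv_rhs => rw [← List.takeWhile_append_dropWhile (p := fun e => decide (e.1 ≤ a)) (l := l)]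
  rw [chapF_append, chapF_takeWhile_shift cur l a q haq]

-- A's page loop produces the pages paired with their chapters
lemma loopA (n : Nat) : ∀ (a b : Int), (b - a).toNat = n →
    ∀ (l : List (Int × String)) (cur : String) (d : PySem.Dict Int String),
    l.Pairwise (fun x y => x.1 ≤ y.1) → (∀ q, a ≤ q → d.contains q = false) →
    ((PySem.List.pyRange a b 1).foldl
      (fun (st : PySem.Dict Int String × List (Int × String) × String) p =>
        let x := advanceA st.2.1 st.2.2 p
        (st.1.insert p x.2, x.1, x.2))
      (d, l, cur)).1.items
      = d.items ++ (PySem.List.pyRange a b 1).map (fun q => (q, chapF cur l q)) := by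
  induction n with
  | zero =>
    intro a b hab l cur d _ _
    have : PySem.List.pyRange a b 1 = [] := by
      rw [PySem.List.pyRange_one, hab]; simp
    simp [this]
  | succ n ih =>
    intro a b hab l cur d hs hd
    have hlt : a < b := by omega
    rw [PySem.List.pyRange_one_cons hlt]
    simp only [List.foldl_cons, List.map_cons]
    rw [advanceA_eq]
    have hrec := ih (a + 1) b (by omega)
      (l.dropWhile (fun e => decide (e.1 ≤ a)))
      (chapF cur (l.takeWhile (fun e => decide (e.1 ≤ a))) a)
      ((d.insert a (chapF cur (l.takeWhile (fun e => decide (e.1 ≤ a))) a)))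
      (hs.sublist (List.dropWhile_sublist _))
      ?_
    · rw [hrec]
      rw [PySem.Dict.items_insert_of_not_contains _ _ (hd a le_rfl)]
      rw [List.append_assoc]
      congr 1
      simp only [List.cons_append, List.nil_append]
      congr 1
      · rw [chapF_takeWhile cur l a hs]
      · apply List.map_congr_left
        intro q hq
        have hmem := (PySem.List.mem_pyRange_one).1 hq
        rw [chapF_drop_shift cur l a q (by omega)]
    · intro q hq
      rw [PySem.Dict.contains_insert]
      have h1 : (q == a) = false := by simp; omega
      rw [h1, Bool.false_or]
      exact hd q (by omega)

-- ---- B-side characterisation ----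

lemma contains_mk_map_fst {f : Int × String → Int × String}
    (hf : ∀ e, (f e).1 = e.1) (items : List (Int × String)) (k : Int) :
    (PySem.Dict.mk (items.map f)).contains k = (PySem.Dict.mk items).contains k := by
  induction items with
  | nil => rfl
  | cons x t ih =>
    simp only [List.map_cons, PySem.Dict.contains_mk, List.any_cons, hf x] at *
    rw [ih]

-- one entry's write loop: every key in [lo,hi) is overwritten with t
lemma items_range_insert (t : String) : ∀ (lo hi : Int) (n : Nat), (hi - lo).toNat = n →
    ∀ (d : PySem.Dict Int String), (∀ p, lo ≤ p → p < hi → d.contains p = true) →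
    ((PySem.List.pyRange lo hi 1).foldl (fun d p => d.insert p t) d).items
      = d.items.map (fun e => if lo ≤ e.1 ∧ e.1 < hi then (e.1, t) else e) := by
  intro lo hi n
  induction n generalizing lo with
  | zero =>
    intro hab d _
    have : PySem.List.pyRange lo hi 1 = [] := by
      rw [PySem.List.pyRange_one, hab]; simp
    have h2 : ∀ e ∈ d.items, ¬ (lo ≤ e.1 ∧ e.1 < hi) := by intro e _; omega
    rw [this]; simp only [List.foldl_nil]
    rw [List.map_congr_left (fun e he => by rw [if_neg (h2 e he)])]
    simp
  | succ n ih =>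
    intro hab d hc
    have hlt : lo < hi := by omega
    rw [PySem.List.pyRange_one_cons hlt]
    simp only [List.foldl_cons]
    have hcl : d.contains lo = true := hc lo le_rfl hlt
    have hrec := ih (lo + 1) (by omega) (d.insert lo t) ?_
    · rw [hrec]
      rw [PySem.Dict.items_insert_of_contains _ _ hcl]
      rw [List.map_map]
      apply List.map_congr_left
      intro e _
      simp only [Function.comp_apply]
      by_cases h : e.1 = lo
      · have hb : (e.1 == lo) = true := by simp [h]
        rw [if_pos hb, h, if_neg (show ¬(lo + 1 ≤ lo ∧ lo < hi) by omega),
          if_pos (show lo ≤ lo ∧ lo < hi from ⟨le_rfl, hlt⟩)]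
      · have hb : ¬((e.1 == lo) = true) := by simp [h]
        rw [if_neg hb]
        by_cases h2 : lo + 1 ≤ e.1 ∧ e.1 < hi
        · rw [if_pos h2, if_pos (by omega)]
        · rw [if_neg h2, if_neg (by omega)]
    · intro p hp1 hp2
      rw [PySem.Dict.contains_insert]
      rcases eq_or_ne p lo with rfl | hne
      · simp
      · have : (p == lo) = false := by simp [hne]
        rw [this, Bool.false_or]
        exact hc p (by omega) hp2

-- the lookahead value ('end' in Source B) as a named function, for stating the induction
def nextP : List (Int × String) → Int → Int
  | [], total => total + 1
  | (pg2, _) :: _, _ => pg2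

lemma fillB_cons (total pg : Int) (t : String) (rest : List (Int × String)) (d : PySem.Dict Int String) :
    fillB total ((pg, t) :: rest) d
      = fillB total rest
          ((PySem.List.pyRange (max pg 1) (min (nextP rest total) (total + 1)) 1).foldl
            (fun d p => d.insert p t) d) := by
  cases rest <;> rfl

-- B's entry loop applied to a map whose keys are exactly the pages
lemma fillB_items (total : Int) : ∀ (l : List (Int × String)) (d : PySem.Dict Int String),
    (∀ e ∈ d.items, 1 ≤ e.1 ∧ e.1 ≤ total) →
    (∀ p : Int, 1 ≤ p → p ≤ total → d.contains p = true) →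
    (fillB total l d).items = d.items.map (fun e => (e.1, chapF e.2 l e.1)) := by
  intro l
  induction l with
  | nil =>
    intro d _ _
    simp [fillB, chapF]
  | cons x rest ih =>
    intro d hk hc
    obtain ⟨pg, t⟩ := x
    rw [fillB_cons]
    set endp : Int := nextP rest total with hendp
    have hstep := items_range_insert t (max pg 1) (min endp (total + 1))
      ((min endp (total + 1)) - (max pg 1)).toNat rfl d ?_
    · set d1 := (PySem.List.pyRange (max pg 1) (min endp (total + 1)) 1).foldl
        (fun d p => d.insert p t) d with hd1
      have hd1items : d1.items = d.items.map
          (fun e => if max pg 1 ≤ e.1 ∧ e.1 < min endp (total + 1) then (e.1, t) else e) := hstep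
      have hfst : ∀ e : Int × String,
          ((fun e => if max pg 1 ≤ e.1 ∧ e.1 < min endp (total + 1) then (e.1, t) else e) e).1 = e.1 := by
        intro e; dsimp only; split <;> rfl
      have hrec := ih d1 ?_ ?_
      · rw [hrec, hd1items, List.map_map]
        apply List.map_congr_left
        intro e he
        have hke := hk e he
        simp only [Function.comp_apply]
        by_cases hcond : max pg 1 ≤ e.1 ∧ e.1 < min endp (total + 1)
        · rw [if_pos hcond]
          have hpg : pg ≤ e.1 := by omega
          simp only [chapF, List.foldl_cons, if_pos hpg]
        · rw [if_neg hcond]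
          simp only [chapF, List.foldl_cons]
          by_cases hpg : pg ≤ e.1
          · rw [if_pos hpg]
            -- e.1 ≥ endp, so rest is nonempty with head page ≤ e.1 and the head overwrites the acc
            have hend : endp ≤ e.1 := by omega
            match rest, hendp with
            | [], h0 => exfalso; rw [h0, nextP] at hend; omega
            | (pg2, t2) :: r2, h0 =>
              have hpg2 : pg2 ≤ e.1 := by rw [h0, nextP] at hend; exact hend
              simp only [List.foldl_cons, if_pos hpg2]
          · rw [if_neg hpg]
      · intro e he
        rw [hd1items] at he
        obtain ⟨e0, he0, rfl⟩ := List.mem_map.1 he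
        obtain ⟨h1, h2⟩ := hk e0 he0
        split
        · exact ⟨h1, h2⟩
        · exact ⟨h1, h2⟩
      · intro p hp1 hp2
        have hmk : d1.contains p = (PySem.Dict.mk d1.items).contains p := rfl
        rw [hmk, hd1items, contains_mk_map_fst hfst]
        exact hc p hp1 hp2
    · intro p hp1 hp2
      exact hc p (by omega) (by omega)

-- the pre-filled map: pages 1..total each mapped to "Unknown Chapter"
lemma d0_items (total : Int) :
    ((PySem.List.pyRange 1 (total + 1) 1).foldl
      (fun (d : PySem.Dict Int String) p => d.insert p "Unknown Chapter") PySem.Dict.empty).items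
      = (PySem.List.pyRange 1 (total + 1) 1).map (fun p => (p, "Unknown Chapter")) := by
  have := PySem.Dict.items_foldl_insert_fresh (l := PySem.List.pyRange 1 (total + 1) 1)
    (k := fun p => p) (v := fun _ => "Unknown Chapter") (d := PySem.Dict.empty)
    (by intro a _; simp [PySem.Dict.contains_empty])
    (by simpa using PySem.List.nodup_pyRange_one (a := 1) (b := total + 1))
  simpa using this

-- ===== VERDICT (by name: the statement is the Claim_ definition above) =====
theorem build_chapter_map_spec : Claim_equal_build_chapter_map := by
  intro toc total_pages _
  unfold Spec_build_chapter_map build_chapter_map build_chapter_map_alt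
  set entries := PySem.List.sorted2 (toc.map (fun e => (e.2.2, e.2.1))) Prod.fst Prod.snd with hent
  have hs : entries.Pairwise (fun a b => a.1 ≤ b.1) := sorted2_pairwise_fst _
  set d0 := (PySem.List.pyRange 1 (total_pages + 1) 1).foldl
    (fun (d : PySem.Dict Int String) p => d.insert p "Unknown Chapter") PySem.Dict.empty with hd0
  have hd0i : d0.items = (PySem.List.pyRange 1 (total_pages + 1) 1).map
      (fun p => (p, "Unknown Chapter")) := d0_items total_pages
  have hB : (fillB total_pages entries d0).items
      = (PySem.List.pyRange 1 (total_pages + 1) 1).map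
          (fun q => (q, chapF "Unknown Chapter" entries q)) := by
    rw [fillB_items total_pages entries d0 ?_ ?_, hd0i, List.map_map]
    · apply List.map_congr_left
      intro q _; rfl
    · intro e he
      rw [hd0i] at he
      obtain ⟨q, hq, rfl⟩ := List.mem_map.1 he
      have := (PySem.List.mem_pyRange_one).1 hq
      constructor <;> omega
    · intro p hp1 hp2
      rw [PySem.Dict.contains_iff_mem_keys]
      simp only [PySem.Dict.keys, hd0i, List.map_map]
      refine List.mem_map.2 ⟨p, ?_, rfl⟩
      exact (PySem.List.mem_pyRange_one).2 ⟨hp1, by omega⟩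
  by_cases hne : entries = []
  · rw [if_pos hne, hB, hne]
    rw [hd0i]
    apply List.map_congr_left
    intro q _; rfl
  · rw [if_neg hne, hB]
    have := loopA (total_pages + 1 - 1).toNat 1 (total_pages + 1) rfl entries
      "Unknown Chapter" PySem.Dict.empty hs
      (by intro q _; simp [PySem.Dict.contains_empty])
    rw [this]
    simp [PySem.Dict.empty]
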